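-- pv_equiv track=rewrite | github.com/sushma3232/function1 | sumreminder.py | FindSumOfRemainders
-- ===== SOURCE A (Python) =====
-- def FindSumOfRemainders(n, div):
--     i=1
--     result=0
--     while i<=n:
--         a=i%div
--         result+=a
--         i=i+1
--     return result
-- ===== SOURCE B (Python) =====
-- def FindSumOfRemainders(n, div):
--     # Closed form: q full cycles of remainders sum to q*m*(m-1)/2, plus a
--     # triangular partial cycle; negative divisors shift each nonzero remainder by div.
--     if n <= 0:
--         return 0
--     m = abs(div)
--     q, r = divmod(n, m)
--     s = q * m * (m - 1) // 2 + r * (r + 1) // 2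
--     if div < 0:
--         s += div * (n - q)
--     return s
-- ===== Notes on version B (the rewrite author's own statement) =====
-- stated objective: faster
-- what changed: Replaces the O(n) accumulation loop over i=1..n with an O(1) closed form: floor(n/|div|) full remainder cycles each summing |div|(|div|-1)/2 plus a triangular partial cycle, with a div*(n - n//|div|) correction for negative divisors.
import Mathlib
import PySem

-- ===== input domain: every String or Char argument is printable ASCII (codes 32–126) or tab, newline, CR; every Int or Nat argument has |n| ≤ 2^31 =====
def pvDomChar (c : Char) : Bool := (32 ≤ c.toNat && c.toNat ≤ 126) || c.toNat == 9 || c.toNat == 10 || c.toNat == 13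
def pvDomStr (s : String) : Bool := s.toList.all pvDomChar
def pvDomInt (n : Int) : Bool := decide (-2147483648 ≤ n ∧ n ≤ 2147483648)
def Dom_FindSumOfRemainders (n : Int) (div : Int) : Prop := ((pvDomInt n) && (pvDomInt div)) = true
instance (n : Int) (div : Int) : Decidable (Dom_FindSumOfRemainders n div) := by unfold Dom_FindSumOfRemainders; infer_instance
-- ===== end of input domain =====

-- B replaces A's O(n) remainder-accumulation loop by an O(1) closed form (full cycles + triangular partial cycle).

-- ===== PORT A =====
-- the while loop: i counts up from 1 to n, result accumulates i % div
def FSRloop (n d i result : Int) : Int :=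
  if i ≤ n then FSRloop n d (i + 1) (result + PySem.Int.mod i d) else result
termination_by (n + 1 - i).toNat
decreasing_by omega

def FindSumOfRemainders (n : Int) (div : Int) : Int := FSRloop n div 1 0

-- ===== PORT B =====
def FindSumOfRemainders_alt (n : Int) (div : Int) : Int :=
  if n ≤ 0 then 0
  else
    let m := |div|
    let q := PySem.Int.floordiv n m
    let r := PySem.Int.mod n m
    let s := PySem.Int.floordiv (q * m * (m - 1)) 2 + PySem.Int.floordiv (r * (r + 1)) 2
    if div < 0 then s + div * (n - q) else s

-- ===== PRECONDITION & SPEC =====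
-- Pre_ excludes exactly the inputs (n ≥ 1 with div = 0) on which Python A raises ZeroDivisionError.
def Pre_FindSumOfRemainders (n : Int) (div : Int) : Prop := div ≠ 0 ∨ n < 1
instance (n : Int) (div : Int) : Decidable (Pre_FindSumOfRemainders n div) := by unfold Pre_FindSumOfRemainders; infer_instance
def pvWitness_FindSumOfRemainders : Int × Int := (10, 3)

def Spec_FindSumOfRemainders (n : Int) (div : Int) (out : Int) : Prop := out = FindSumOfRemainders_alt n div
instance (n : Int) (div : Int) (out : Int) : Decidable (Spec_FindSumOfRemainders n div out) := by unfold Spec_FindSumOfRemainders; infer_instance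

-- ===== CLAIM (what is proved, stated in full; the proofs are below) =====
def Claim_equal_FindSumOfRemainders : Prop := ∀ (n : Int) (div : Int), Dom_FindSumOfRemainders n div → Pre_FindSumOfRemainders n div → Spec_FindSumOfRemainders n div (FindSumOfRemainders n div)

-- ===== LEMMAS AND PROOFS =====

-- sum of j % d for j = i, i+1, …, i+k-1
def sumUp (d i : Int) : Nat → Int
  | 0 => 0
  | k + 1 => PySem.Int.mod i d + sumUp d (i + 1) k

lemma FSRloop_eq (d : Int) : ∀ (k : Nat) (i res : Int), FSRloop (i + k - 1) d i res = res + sumUp d i k := by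
  intro k
  induction k with
  | zero =>
    intro i res
    rw [FSRloop, if_neg (by push_cast; omega)]
    simp [sumUp]
  | succ k ih =>
    intro i res
    rw [FSRloop, if_pos (by push_cast; omega)]
    have harg : i + ((k : Int) + 1) - 1 = (i + 1) + (k : Int) - 1 := by ring
    push_cast
    rw [harg, ih (i + 1) (res + PySem.Int.mod i d)]
    simp only [sumUp]
    ring

lemma sumUp_succ (d : Int) : ∀ (k : Nat) (i : Int), sumUp d i (k + 1) = sumUp d i k + PySem.Int.mod (i + k) d := by
  intro k
  induction k with
  | zero => intro i; simp [sumUp]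
  | succ k ih =>
    intro i
    have h1 : sumUp d i (k + 1 + 1) = PySem.Int.mod i d + sumUp d (i + 1) (k + 1) := rfl
    have h2 : sumUp d i (k + 1) = PySem.Int.mod i d + sumUp d (i + 1) k := rfl
    have harg : (i + 1) + (k : Int) = i + ((k + 1 : Nat) : Int) := by push_cast; ring
    rw [h1, ih (i + 1), h2, harg]
    ring

-- stepping n ↦ n+1 through euclidean div/mod by m > 0
lemma emod_step (m a : Int) (hm : 0 < m) :
    ((a + 1) / m = a / m ∧ (a + 1) % m = a % m + 1 ∧ a % m + 1 < m) ∨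
    ((a + 1) / m = a / m + 1 ∧ (a + 1) % m = 0 ∧ a % m + 1 = m) := by
  have h1 := Int.emod_nonneg a (by omega : m ≠ 0)
  have h2 := Int.emod_lt_of_pos a hm
  have h3 := Int.mul_ediv_add_emod a m
  by_cases hc : a % m + 1 = m
  · right
    have hq : (0 : Int) + m * (a / m + 1) = a + 1 := by
      have hexp : m * (a / m + 1) = m * (a / m) + m := by ring
      linarith
    have := (Int.ediv_emod_unique (a := a + 1) (b := m) (q := a / m + 1) (r := 0) hm).mpr
      ⟨hq, le_refl 0, hm⟩
    exact ⟨this.1, this.2, hc⟩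
  · left
    have hq : (a % m + 1) + m * (a / m) = a + 1 := by linarith
    have := (Int.ediv_emod_unique (a := a + 1) (b := m) (q := a / m) (r := a % m + 1) hm).mpr
      ⟨hq, by omega, by omega⟩
    exact ⟨this.1, this.2, by omega⟩

-- Python % with a negative divisor, in terms of euclidean % by -d
lemma pymod_neg (d a : Int) (hd : d < 0) :
    PySem.Int.mod a d = if a % (-d) = 0 then 0 else a % (-d) + d := by
  set m := -d with hmdef
  have hd' : d = -m := by omega
  have hm0 : 0 < m := by omega
  obtain ⟨hb1, hb2⟩ := PySem.Int.mod_neg_bounds (a := a) (b := d) hd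
  have hf := PySem.Int.floordiv_mul_add_mod a d
  have h1 := Int.emod_nonneg a (by omega : m ≠ 0)
  have h2 := Int.emod_lt_of_pos a hm0
  have h3 := Int.mul_ediv_add_emod a m
  set md := PySem.Int.mod a d with hmd
  set fd := PySem.Int.floordiv a d with hfd
  have hfdd : fd * d = -(m * fd) := by rw [hd']; ring
  have hexp : m * (a / m + fd) = m * (a / m) + m * fd := by ring
  have key : md - a % m = m * (a / m + fd) := by linarith
  set t := a / m + fd with ht
  have ht01 : t = 0 ∨ t = -1 := by
    by_contra hcon
    have h2' : t ≤ -2 ∨ 1 ≤ t := by omega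
    rcases h2' with h | h
    · nlinarith
    · nlinarith
  rcases ht01 with h | h
  · rw [h, mul_zero] at key
    split_ifs with hz <;> omega
  · rw [h, show m * (-1 : Int) = -m by ring] at key
    split_ifs with hz <;> omega

-- twice the remainder sum, written without divisions-by-2
def cform (d : Int) (k : Nat) : Int :=
  ((k : Int) / |d|) * |d| * (|d| - 1) + ((k : Int) % |d|) * ((k : Int) % |d| + 1) +
    (if d < 0 then 2 * d * ((k : Int) - (k : Int) / |d|) else 0)

lemma sum_closed (d : Int) (hd : d ≠ 0) : ∀ k : Nat, 2 * sumUp d 1 k = cform d k := by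
  have hm0 : 0 < |d| := abs_pos.mpr hd
  intro k
  induction k with
  | zero => simp [sumUp, cform]
  | succ k ih =>
    rw [sumUp_succ, mul_add, ih, show (1 : Int) + (k : Int) = (k : Int) + 1 by ring]
    rcases emod_step |d| k hm0 with ⟨hq, hr, hlt⟩ | ⟨hq, hr, heq⟩ <;>
      rcases lt_or_gt_of_ne hd with hneg | hpos
    · -- no wrap, d < 0
      have habs : -d = |d| := (abs_of_neg hneg).symm
      have hnz : ¬ ((k : Int) + 1) % |d| = 0 := by
        have := Int.emod_nonneg (k : Int) (by omega : |d| ≠ 0)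
        rw [hr]; omega
      rw [pymod_neg d ((k : Int) + 1) hneg, habs, if_neg hnz]
      simp only [cform, Nat.cast_add, Nat.cast_one, hq, hr, if_pos hneg]
      ring
    · -- no wrap, d > 0
      have hdn : ¬ d < 0 := by omega
      have habs : |d| = d := abs_of_pos hpos
      rw [habs] at hq hr
      rw [PySem.Int.mod_eq_emod_of_pos hpos]
      simp only [cform, Nat.cast_add, Nat.cast_one, habs, if_neg hdn]
      rw [hq, hr]
      ring
    · -- wrap, d < 0
      have habs : -d = |d| := (abs_of_neg hneg).symm
      rw [pymod_neg d ((k : Int) + 1) hneg, habs, if_pos hr]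
      simp only [cform, Nat.cast_add, Nat.cast_one, hq, hr, if_pos hneg]
      have hrk : (k : Int) % |d| = |d| - 1 := by omega
      rw [hrk]
      ring
    · -- wrap, d > 0
      have hdn : ¬ d < 0 := by omega
      have habs : |d| = d := abs_of_pos hpos
      rw [habs] at hq hr heq
      rw [PySem.Int.mod_eq_emod_of_pos hpos]
      simp only [cform, Nat.cast_add, Nat.cast_one, habs, if_neg hdn]
      rw [hq, hr]
      have hrk : (k : Int) % d = d - 1 := by omega
      rw [hrk]
      ring

lemma alt_doubled (n d : Int) (hn : 1 ≤ n) (hd : d ≠ 0) :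
    2 * FindSumOfRemainders_alt n d = cform d n.toNat := by
  have hm0 : 0 < |d| := abs_pos.mpr hd
  have hcast : ((n.toNat : Int)) = n := by omega
  unfold FindSumOfRemainders_alt
  rw [if_neg (by omega : ¬ n ≤ 0)]
  simp only [PySem.Int.floordiv_eq_ediv_of_pos hm0, PySem.Int.mod_eq_emod_of_pos hm0,
    PySem.Int.floordiv_eq_ediv_of_pos (by norm_num : (0 : Int) < 2)]
  set q := n / |d| with hqd
  set r := n % |d| with hrd
  have hdvd1 : (2 : Int) ∣ q * |d| * (|d| - 1) := by
    have : (2 : Int) ∣ (|d| - 1) * ((|d| - 1) + 1) := (Int.even_mul_succ_self (|d| - 1)).two_dvd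
    have h2 : q * |d| * (|d| - 1) = q * ((|d| - 1) * ((|d| - 1) + 1)) := by ring
    rw [h2]
    exact Dvd.dvd.mul_left this q
  have hdvd2 : (2 : Int) ∣ r * (r + 1) := (Int.even_mul_succ_self r).two_dvd
  have he1 : 2 * (q * |d| * (|d| - 1) / 2) = q * |d| * (|d| - 1) := Int.mul_ediv_cancel' hdvd1
  have he2 : 2 * (r * (r + 1) / 2) = r * (r + 1) := Int.mul_ediv_cancel' hdvd2
  unfold cform
  rw [hcast]
  split_ifs with hlt
  · rw [← hqd, ← hrd]; linarith
  · rw [← hqd, ← hrd]; linarith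

-- ===== VERDICT (by name: the statement is the Claim_ definition above) =====
theorem FindSumOfRemainders_spec : Claim_equal_FindSumOfRemainders := by
  unfold Claim_equal_FindSumOfRemainders Spec_FindSumOfRemainders Pre_FindSumOfRemainders
  intro n d _ hpre
  by_cases hn : n ≤ 0
  · unfold FindSumOfRemainders FindSumOfRemainders_alt
    rw [FSRloop, if_neg (by omega), if_pos hn]
  · have hn1 : 1 ≤ n := by omega
    have hd : d ≠ 0 := by
      rcases hpre with h | h
      · exact h
      · omega
    have hcast : ((n.toNat : Int)) = n := by omega
    have hA : FindSumOfRemainders n d = sumUp d 1 n.toNat := by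
      unfold FindSumOfRemainders
      have h := FSRloop_eq d n.toNat 1 0
      rw [show (1 : Int) + (n.toNat : Int) - 1 = n by omega] at h
      rw [h]; ring
    have h2 : 2 * FindSumOfRemainders n d = 2 * FindSumOfRemainders_alt n d := by
      rw [hA, sum_closed d hd, ← alt_doubled n d hn1 hd]
    omega
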